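-- pv_equiv track=rewrite | github.com/BiancaBb01/Python_Exercices | .venv/ex6.py | count_unique_and_duplicates
-- ===== SOURCE A (Python) =====
-- def count_unique_and_duplicates(lst):
--     unique_elements = set()
--     duplicates_seen = set()
--     duplicate_count = 0
--
--     for item in lst:
--         if item in unique_elements:
--             if item not in duplicates_seen:
--                 duplicates_seen.add(item)
--                 duplicate_count += 1
--         else:
--             unique_elements.add(item)
--
--     unique_count = len(unique_elements)
--
--     return (unique_count, duplicate_count)
-- ===== SOURCE B (Python) =====
-- def count_unique_and_duplicates(lst):
--     counts = {}
--     for item in lst: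
--         counts[item] = counts.get(item, 0) + 1
--     duplicate_count = 0
--     for c in counts.values():
--         if c > 1:
--             duplicate_count += 1
--     return (len(counts), duplicate_count)
-- ===== Notes on version B (the rewrite author's own statement) =====
-- stated objective: idiomatic
-- what changed: Replaces A's per-item two-set membership branching with a frequency-table pass (value -> count) followed by a separate aggregate scan over the counts; unique = table size, duplicates = counts greater than 1.
import Mathlib
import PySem

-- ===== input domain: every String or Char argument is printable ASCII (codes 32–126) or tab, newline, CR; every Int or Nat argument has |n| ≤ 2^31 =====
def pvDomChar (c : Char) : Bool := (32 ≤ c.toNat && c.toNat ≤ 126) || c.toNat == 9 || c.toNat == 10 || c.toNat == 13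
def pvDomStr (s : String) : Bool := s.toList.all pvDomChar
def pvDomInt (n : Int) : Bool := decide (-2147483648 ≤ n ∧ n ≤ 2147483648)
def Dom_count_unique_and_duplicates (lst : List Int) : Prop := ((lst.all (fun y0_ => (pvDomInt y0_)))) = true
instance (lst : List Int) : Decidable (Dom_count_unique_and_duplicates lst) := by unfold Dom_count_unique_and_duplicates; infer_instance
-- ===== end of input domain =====

-- B replaces A's per-item two-set membership branching with a frequency table built in one
-- pass plus a separate aggregate scan over the counts (idiomatic; same O(n) cost).

-- ===== PORT A =====
-- loop body of A: state = (unique_elements, duplicates_seen, duplicate_count)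
def cuadStep (st : PySem.Set Int × PySem.Set Int × Int) (item : Int) :
    PySem.Set Int × PySem.Set Int × Int :=
  if PySem.Set.contains st.1 item then
    if ¬ (PySem.Set.contains st.2.1 item) then
      (st.1, PySem.Set.add st.2.1 item, st.2.2 + 1)
    else st
  else
    (PySem.Set.add st.1 item, st.2.1, st.2.2)

def count_unique_and_duplicates (lst : List Int) : Int × Int :=
  let st := lst.foldl cuadStep (PySem.Set.empty, PySem.Set.empty, 0)
  (PySem.Set.len st.1, st.2.2)

-- ===== PORT B =====
def count_unique_and_duplicates_alt (lst : List Int) : Int × Int :=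
  let counts := lst.foldl (fun d x => d.insert x (d.getD x 0 + 1))
    (PySem.Dict.empty : PySem.Dict Int Int)
  let dup := (PySem.Dict.values counts).foldl
    (fun acc c => if c > 1 then acc + 1 else acc) 0
  ((PySem.Dict.size counts : Int), dup)

-- ===== PRECONDITION & SPEC =====
def Spec_count_unique_and_duplicates (lst : List Int) (out : Int × Int) : Prop := out = count_unique_and_duplicates_alt lst
instance (lst : List Int) (out : Int × Int) : Decidable (Spec_count_unique_and_duplicates lst out) := by unfold Spec_count_unique_and_duplicates; infer_instance

-- ===== CLAIM (what is proved, stated in full; the proofs are below) =====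
def Claim_equal_count_unique_and_duplicates : Prop := ∀ (lst : List Int), Dom_count_unique_and_duplicates lst → Spec_count_unique_and_duplicates lst (count_unique_and_duplicates lst)

-- ===== LEMMAS AND PROOFS =====

-- Invariant of A's loop: after processing lst, unique_elements = set(lst),
-- duplicates_seen is a duplicate-free list of exactly the values occurring ≥ 2 times,
-- and duplicate_count is its length.
def cuadInv (lst : List Int) (st : PySem.Set Int × PySem.Set Int × Int) : Prop :=
  st.1 = PySem.Set.ofList lst ∧ st.2.1.Nodup ∧
    (∀ y, y ∈ st.2.1 ↔ 2 ≤ lst.count y) ∧ st.2.2 = (st.2.1.length : Int)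

lemma cuadInv_step (lst : List Int) (st : PySem.Set Int × PySem.Set Int × Int) (x : Int)
    (h : cuadInv lst st) : cuadInv (lst ++ [x]) (cuadStep st x) := by
  obtain ⟨hu, hnd, hmem, hc⟩ := h
  have hcount : ∀ y, (lst ++ [x]).count y = lst.count y + (if y = x then 1 else 0) := by
    intro y
    rcases eq_or_ne y x with rfl | h
    · simp [List.count_append]
    · have hx : x ≠ y := fun hh => h hh.symm
      simp [List.count_append, h, hx]
  unfold cuadStep
  by_cases hxu : x ∈ st.1
  · have : PySem.Set.contains st.1 x = true := by
      simpa [PySem.Set.contains_iff] using hxu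
    rw [hu] at hxu
    have hxlst : x ∈ lst := by rw [PySem.Set.mem_ofList] at hxu; exact hxu
    have hcx : 1 ≤ lst.count x := List.one_le_count_iff.2 hxlst
    by_cases hxd : x ∈ st.2.1
    · have hd : PySem.Set.contains st.2.1 x = true := by
        simpa [PySem.Set.contains_iff] using hxd
      simp only [this, hd, not_true_eq_false, if_true, if_false]
      refine ⟨by rw [hu, PySem.Set.ofList_append_singleton, PySem.Set.add_of_mem hxu], hnd, ?_, hc⟩
      intro y; rw [hmem y, hcount y]
      rcases eq_or_ne y x with rfl | hne
      · have h2 := (hmem _).1 hxd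
        omega
      · simp [hne]
    · have hd : PySem.Set.contains st.2.1 x = false := by
        simp at hxd ⊢; exact hxd
      have hcx1 : lst.count x = 1 := by
        have := (hmem x).not.1 hxd; omega
      simp only [this, hd, Bool.false_eq_true, not_false_iff, if_pos]
      refine ⟨by rw [hu, PySem.Set.ofList_append_singleton, PySem.Set.add_of_mem hxu], ?_, ?_, ?_⟩
      · rw [PySem.Set.add_of_not_mem hxd]
        exact List.Nodup.append hnd (List.nodup_singleton _) (by simpa using hxd)
      · intro y
        rw [PySem.Set.mem_add, hmem y, hcount y]
        rcases eq_or_ne y x with rfl | hne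
        · simp [hcx1]
        · simp [hne]
      · rw [PySem.Set.add_of_not_mem hxd]; simp [hc]
  · have : PySem.Set.contains st.1 x = false := by
      simp at hxu ⊢; exact hxu
    rw [hu] at hxu
    have hxlst : x ∉ lst := by rw [PySem.Set.mem_ofList] at hxu; exact hxu
    have hcx0 : lst.count x = 0 := List.count_eq_zero.2 hxlst
    simp only [this, Bool.false_eq_true, if_false]
    refine ⟨by rw [hu, PySem.Set.ofList_append_singleton], hnd, ?_, hc⟩
    intro y; rw [hmem y, hcount y]
    rcases eq_or_ne y x with rfl | hne
    · simp [hcx0]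
    · simp [hne]

lemma cuadInv_foldl (lst : List Int) :
    cuadInv lst (lst.foldl cuadStep (PySem.Set.empty, PySem.Set.empty, 0)) := by
  induction lst using List.reverseRecOn with
  | nil =>
    refine ⟨rfl, List.nodup_nil, ?_, rfl⟩
    intro y; simp [PySem.Set.empty]
  | append_singleton xs x ih =>
    rw [List.foldl_append]
    exact cuadInv_step xs _ x ih

-- The filter of the distinct values by "count > 1" has the same members as A's
-- duplicates_seen, both duplicate-free, hence the same length.
lemma cuad_dup_length (lst : List Int) (d : List Int) (hnd : d.Nodup)
    (hmem : ∀ y, y ∈ d ↔ 2 ≤ lst.count y) :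
    d.length = ((PySem.Set.ofList lst).filter (fun k => decide (1 < lst.count k))).length := by
  apply List.Perm.length_eq
  apply (List.perm_ext_iff_of_nodup hnd (List.Nodup.filter _ (PySem.Set.nodup_ofList lst))).2
  intro y
  rw [hmem y, List.mem_filter, PySem.Set.mem_ofList]
  constructor
  · intro h
    exact ⟨List.one_le_count_iff.1 (by omega), by simp; omega⟩
  · rintro ⟨-, h⟩; simp at h; omega

-- ===== VERDICT (by name: the statement is the Claim_ definition above) =====
theorem count_unique_and_duplicates_spec : Claim_equal_count_unique_and_duplicates := by
  intro lst _
  unfold Spec_count_unique_and_duplicates count_unique_and_duplicates count_unique_and_duplicates_alt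
  dsimp only
  obtain ⟨hu, hnd, hmem, hc⟩ := cuadInv_foldl lst
  rw [PySem.Dict.foldl_insert_getD_add_one_eq_counter]
  rw [show (fun (acc c : Int) => if c > 1 then acc + 1 else acc)
      = (fun (acc : Int) c => if (fun c => decide (c > 1)) c = true then acc + 1 else acc) from by
    funext a c; by_cases h : c > 1 <;> simp [h]]
  rw [PySem.List.foldl_count_if (fun c => decide (c > 1))]
  have hsize : PySem.Dict.size (PySem.Dict.counter lst) = (PySem.Set.ofList lst).length := by
    have : (PySem.Dict.counter lst).keys = PySem.Set.ofList lst := PySem.Dict.keys_counter lst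
    simpa [PySem.Dict.size, PySem.Dict.keys] using congrArg List.length this
  have hvals : PySem.Dict.values (PySem.Dict.counter lst)
      = (PySem.Set.ofList lst).map (fun k => (lst.count k : Int)) := by
    have := PySem.Dict.items_counter lst
    simp [PySem.Dict.values, this]
  have hcnt : List.countP (fun c => decide (c > 1))
        (PySem.Dict.values (PySem.Dict.counter lst))
      = ((PySem.Set.ofList lst).filter (fun k => decide (1 < lst.count k))).length := by
    rw [hvals, List.countP_map, List.countP_eq_length_filter]
    congr 1
    apply List.filter_congr
    intro k _
    simp [Function.comp]
  refine Prod.ext ?_ ?_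
  · simp only [hu, hsize, PySem.Set.len]
  · simp only [hc, hcnt, zero_add]
    exact_mod_cast cuad_dup_length lst _ hnd hmem
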